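-- pv_equiv track=rewrite | github.com/gxgyaase75/CMSC201Projects | pytzee.py | check_of_a_kind
-- ===== SOURCE A (Python) =====
-- def check_of_a_kind(dice_roll, num):
--     """
--     :param: the dice roll and the number in a row (three or four)
--     :return: A true/false that confirms there is or is not that number of the
--     same number in a row.
--     """
--     if num == 3:
--         # Checks all possible combinations for three of one side of die
--         for i in range(len(dice_roll)):
--             for j in range(len(dice_roll)):
--                 for k in range(len(dice_roll)):
--                     if (dice_roll[i] == dice_roll[j] and i != j) and \
--                         (dice_roll[i] == dice_roll[k] and i != k) and (j != k):
--                         return True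
--         return False
--     elif num == 4:
--         # Checks all possible combinations if there is four of one type of die
--         for i in range(len(dice_roll)):
--             for j in range(len(dice_roll)):
--                 for k in range(len(dice_roll)):
--                     for l in range(len(dice_roll)):
--                         if (dice_roll[i] == dice_roll[j] and i != j) and \
--                             (dice_roll[i] == dice_roll[k] and i != k) and \
--                                 (dice_roll[i] == dice_roll[l] and i != l) and \
--                                     (j != k) and (j != l) and (k != l):
--                             return True
--         return False
-- ===== SOURCE B (Python) =====
-- def check_of_a_kind(dice_roll, num):
--     if num == 3 or num == 4:
--         counts = {}
--         for x in dice_roll: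
--             counts[x] = counts.get(x, 0) + 1
--         return any(c >= num for c in counts.values())
-- ===== Notes on version B (the rewrite author's own statement) =====
-- stated objective: alternative
-- what changed: Replaces the triple/quadruple nested index-pair scans with a single counting pass that builds a value->count dictionary and checks whether any count reaches num.
import Mathlib
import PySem

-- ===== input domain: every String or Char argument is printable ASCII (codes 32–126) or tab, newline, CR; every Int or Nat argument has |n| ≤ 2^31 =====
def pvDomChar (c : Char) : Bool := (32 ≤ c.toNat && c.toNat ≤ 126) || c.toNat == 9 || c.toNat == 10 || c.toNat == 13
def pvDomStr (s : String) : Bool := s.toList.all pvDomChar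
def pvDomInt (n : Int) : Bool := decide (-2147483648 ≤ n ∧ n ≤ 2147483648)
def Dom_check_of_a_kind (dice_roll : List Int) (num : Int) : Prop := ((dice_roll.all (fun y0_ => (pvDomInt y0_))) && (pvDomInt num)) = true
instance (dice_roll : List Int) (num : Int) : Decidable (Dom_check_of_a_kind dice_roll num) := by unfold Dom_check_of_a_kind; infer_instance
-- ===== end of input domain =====

-- B replaces A's nested index-pair scans by a single counting pass over the list (alternative algorithm).

-- ===== PORT A =====
-- dice_roll[i] with 0 ≤ i < len(dice_roll) never raises, so getD i 0 is exact here.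
def check_of_a_kind (dice_roll : List Int) (num : Int) : Option Bool :=
  if num = 3 then
    some ((List.range dice_roll.length).any fun i =>
      (List.range dice_roll.length).any fun j =>
        (List.range dice_roll.length).any fun k =>
          (decide (dice_roll.getD i 0 = dice_roll.getD j 0) && decide (i ≠ j)) &&
          (decide (dice_roll.getD i 0 = dice_roll.getD k 0) && decide (i ≠ k)) &&
          decide (j ≠ k))
  else if num = 4 then
    some ((List.range dice_roll.length).any fun i =>
      (List.range dice_roll.length).any fun j =>
        (List.range dice_roll.length).any fun k =>
          (List.range dice_roll.length).any fun l =>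
            (decide (dice_roll.getD i 0 = dice_roll.getD j 0) && decide (i ≠ j)) &&
            (decide (dice_roll.getD i 0 = dice_roll.getD k 0) && decide (i ≠ k)) &&
            (decide (dice_roll.getD i 0 = dice_roll.getD l 0) && decide (i ≠ l)) &&
            decide (j ≠ k) && decide (j ≠ l) && decide (k ≠ l))
  else
    none

-- ===== PORT B =====
def check_of_a_kind_alt (dice_roll : List Int) (num : Int) : Option Bool :=
  if num = 3 ∨ num = 4 then
    let counts := dice_roll.foldl (fun d x => d.insert x (d.getD x 0 + 1)) PySem.Dict.empty
    some (counts.values.any fun c => decide (num ≤ c))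
  else
    none

-- ===== PRECONDITION & SPEC =====
def Spec_check_of_a_kind (dice_roll : List Int) (num : Int) (out : Option Bool) : Prop := out = check_of_a_kind_alt dice_roll num
instance (dice_roll : List Int) (num : Int) (out : Option Bool) : Decidable (Spec_check_of_a_kind dice_roll num out) := by unfold Spec_check_of_a_kind; infer_instance

-- ===== CLAIM (what is proved, stated in full; the proofs are below) =====
def Claim_equal_check_of_a_kind : Prop := ∀ (dice_roll : List Int) (num : Int), Dom_check_of_a_kind dice_roll num → Spec_check_of_a_kind dice_roll num (check_of_a_kind dice_roll num)

-- ===== LEMMAS AND PROOFS =====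

-- a set of m distinct positions all holding v forces count v ≥ m
lemma pv_count_ge_of_indices (d : List Int) (v : Int) (S : Finset (Fin d.length))
    (hv : ∀ i ∈ S, d[i] = v) : S.card ≤ d.count v := by
  have hpair : (S.sort (· ≤ ·)).Pairwise (· < ·) := (S.sortedLT_sort).pairwise
  have hsub : ((S.sort (· ≤ ·)).map (fun i => d[i])).Sublist d :=
    List.map_getElem_sublist hpair
  have hrep : (S.sort (· ≤ ·)).map (fun i => d[i]) = List.replicate S.card v := by
    have hlen : ((S.sort (· ≤ ·)).map (fun i => d[i])).length = S.card := by
      simp [Finset.length_sort]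
    rw [← hlen]
    apply List.eq_replicate_of_mem
    intro b hb
    obtain ⟨i, hi, hbi⟩ := List.mem_map.mp hb
    exact hbi ▸ hv i (Finset.mem_sort (α := Fin d.length) (· ≤ ·) |>.mp hi)
  calc S.card = (List.replicate S.card v).count v := by simp
    _ ≤ d.count v := by
        have := hsub.count_le v
        rwa [hrep] at this

lemma pv_indices_of_count (d : List Int) (v : Int) (m : ℕ) (h : m ≤ d.count v) :
    ∃ is : List (Fin d.length), is.Pairwise (· < ·) ∧ is.length = m ∧ ∀ i ∈ is, d[i] = v := by
  have hsub : (List.replicate m v).Sublist d := List.replicate_sublist_iff.mpr h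
  obtain ⟨is, his, hp⟩ := List.sublist_eq_map_getElem hsub
  refine ⟨is, hp, ?_, ?_⟩
  · have := congrArg List.length his
    simpa using this.symm
  · intro i hi
    have : d[i] ∈ List.replicate m v := by
      rw [his]; exact List.mem_map_of_mem hi
    exact List.eq_of_mem_replicate this


-- characterization of A's triple loop: some triple of distinct equal positions exists iff some value occurs ≥ 3 times
lemma pv_A3_iff (d : List Int) :
    (((List.range d.length).any fun i =>
      (List.range d.length).any fun j =>
        (List.range d.length).any fun k =>
          (decide (d.getD i 0 = d.getD j 0) && decide (i ≠ j)) &&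
          (decide (d.getD i 0 = d.getD k 0) && decide (i ≠ k)) &&
          decide (j ≠ k)) = true)
    ↔ ∃ v ∈ d, 3 ≤ d.count v := by
  simp only [List.any_eq_true, List.mem_range, Bool.and_eq_true, decide_eq_true_eq]
  constructor
  · rintro ⟨i, hi, j, hj, k, hk, hb⟩
    have hij : d.getD i 0 = d.getD j 0 := by tauto
    have hik : d.getD i 0 = d.getD k 0 := by tauto
    have hij' : i ≠ j := by tauto
    have hik' : i ≠ k := by tauto
    have hjk : j ≠ k := by tauto
    rw [List.getD_eq_getElem d 0 hi, List.getD_eq_getElem d 0 hj] at hij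
    rw [List.getD_eq_getElem d 0 hi, List.getD_eq_getElem d 0 hk] at hik
    refine ⟨d[i], List.getElem_mem hi, ?_⟩
    have hcard : ({⟨i, hi⟩, ⟨j, hj⟩, ⟨k, hk⟩} : Finset (Fin d.length)).card = 3 := by
      rw [Finset.card_insert_of_notMem (by simp [Fin.ext_iff]; omega),
          Finset.card_insert_of_notMem (by simp [Fin.ext_iff]; omega),
          Finset.card_singleton]
    have := pv_count_ge_of_indices d d[i] ({⟨i, hi⟩, ⟨j, hj⟩, ⟨k, hk⟩} : Finset (Fin d.length)) ?_
    · omega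
    · intro t ht
      rcases Finset.mem_insert.mp ht with h | ht
      · subst h; rfl
      rcases Finset.mem_insert.mp ht with h | ht
      · subst h; exact hij.symm
      · rw [Finset.mem_singleton.mp ht]; exact hik.symm
  · rintro ⟨v, hv, hc⟩
    obtain ⟨is, hp, hlen, hval⟩ := pv_indices_of_count d v 3 hc
    match is, hlen, hp, hval with
    | [a, b, c], _, hp, hval =>
      simp only [List.pairwise_cons, List.mem_cons, List.not_mem_nil, or_false,
        forall_eq_or_imp, forall_eq, List.Pairwise.nil, and_true] at hp
      have h1 : a < b := by tauto
      have h2 : a < c := by tauto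
      have h3 : b < c := by tauto
      have ha : d[a] = v := hval a (by simp)
      have hb : d[b] = v := hval b (by simp)
      have hc' : d[c] = v := hval c (by simp)
      have hne : ∀ x y : Fin d.length, x < y → x.1 ≠ y.1 :=
        fun x y h hh => absurd (Fin.ext hh) (ne_of_lt h)
      have hab' : d.getD a.1 0 = d.getD b.1 0 := by
        rw [List.getD_eq_getElem d 0 a.isLt, List.getD_eq_getElem d 0 b.isLt]
        exact ha.trans hb.symm
      have hac' : d.getD a.1 0 = d.getD c.1 0 := by
        rw [List.getD_eq_getElem d 0 a.isLt, List.getD_eq_getElem d 0 c.isLt]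
        exact ha.trans hc'.symm
      refine ⟨a.1, a.isLt, b.1, b.isLt, c.1, c.isLt, ?_⟩
      and_intros <;> first
        | exact hab' | exact hac'
        | exact hne a b h1 | exact hne a c h2 | exact hne b c h3

-- characterization of A's quadruple loop
lemma pv_A4_iff (d : List Int) :
    (((List.range d.length).any fun i =>
      (List.range d.length).any fun j =>
        (List.range d.length).any fun k =>
          (List.range d.length).any fun l =>
            (decide (d.getD i 0 = d.getD j 0) && decide (i ≠ j)) &&
            (decide (d.getD i 0 = d.getD k 0) && decide (i ≠ k)) &&
            (decide (d.getD i 0 = d.getD l 0) && decide (i ≠ l)) &&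
            decide (j ≠ k) && decide (j ≠ l) && decide (k ≠ l)) = true)
    ↔ ∃ v ∈ d, 4 ≤ d.count v := by
  simp only [List.any_eq_true, List.mem_range, Bool.and_eq_true, decide_eq_true_eq]
  constructor
  · rintro ⟨i, hi, j, hj, k, hk, l, hl, hb⟩
    have hij : d.getD i 0 = d.getD j 0 := by tauto
    have hik : d.getD i 0 = d.getD k 0 := by tauto
    have hil : d.getD i 0 = d.getD l 0 := by tauto
    have hij' : i ≠ j := by tauto
    have hik' : i ≠ k := by tauto
    have hil' : i ≠ l := by tauto
    have hjk : j ≠ k := by tauto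
    have hjl : j ≠ l := by tauto
    have hkl : k ≠ l := by tauto
    rw [List.getD_eq_getElem d 0 hi, List.getD_eq_getElem d 0 hj] at hij
    rw [List.getD_eq_getElem d 0 hi, List.getD_eq_getElem d 0 hk] at hik
    rw [List.getD_eq_getElem d 0 hi, List.getD_eq_getElem d 0 hl] at hil
    refine ⟨d[i], List.getElem_mem hi, ?_⟩
    have hcard : ({⟨i, hi⟩, ⟨j, hj⟩, ⟨k, hk⟩, ⟨l, hl⟩} : Finset (Fin d.length)).card = 4 := by
      rw [Finset.card_insert_of_notMem (by simp [Fin.ext_iff]; omega),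
          Finset.card_insert_of_notMem (by simp [Fin.ext_iff]; omega),
          Finset.card_insert_of_notMem (by simp [Fin.ext_iff]; omega),
          Finset.card_singleton]
    have := pv_count_ge_of_indices d d[i]
      ({⟨i, hi⟩, ⟨j, hj⟩, ⟨k, hk⟩, ⟨l, hl⟩} : Finset (Fin d.length)) ?_
    · omega
    · intro t ht
      rcases Finset.mem_insert.mp ht with h | ht
      · subst h; rfl
      rcases Finset.mem_insert.mp ht with h | ht
      · subst h; exact hij.symm
      rcases Finset.mem_insert.mp ht with h | ht
      · subst h; exact hik.symm
      · rw [Finset.mem_singleton.mp ht]; exact hil.symm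
  · rintro ⟨v, hv, hc⟩
    obtain ⟨is, hp, hlen, hval⟩ := pv_indices_of_count d v 4 hc
    match is, hlen, hp, hval with
    | [a, b, c, e], _, hp, hval =>
      simp only [List.pairwise_cons, List.mem_cons, List.not_mem_nil, or_false,
        forall_eq_or_imp, forall_eq, List.Pairwise.nil, and_true] at hp
      have h1 : a < b := by tauto
      have h2 : a < c := by tauto
      have h3 : a < e := by tauto
      have h4 : b < c := by tauto
      have h5 : b < e := by tauto
      have h6 : c < e := by tauto
      have ha : d[a] = v := hval a (by simp)
      have hb : d[b] = v := hval b (by simp)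
      have hc' : d[c] = v := hval c (by simp)
      have he : d[e] = v := hval e (by simp)
      have hne : ∀ x y : Fin d.length, x < y → x.1 ≠ y.1 :=
        fun x y h hh => absurd (Fin.ext hh) (ne_of_lt h)
      have hab' : d.getD a.1 0 = d.getD b.1 0 := by
        rw [List.getD_eq_getElem d 0 a.isLt, List.getD_eq_getElem d 0 b.isLt]
        exact ha.trans hb.symm
      have hac' : d.getD a.1 0 = d.getD c.1 0 := by
        rw [List.getD_eq_getElem d 0 a.isLt, List.getD_eq_getElem d 0 c.isLt]
        exact ha.trans hc'.symm
      have hae' : d.getD a.1 0 = d.getD e.1 0 := by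
        rw [List.getD_eq_getElem d 0 a.isLt, List.getD_eq_getElem d 0 e.isLt]
        exact ha.trans he.symm
      refine ⟨a.1, a.isLt, b.1, b.isLt, c.1, c.isLt, e.1, e.isLt, ?_⟩
      and_intros <;> first
        | exact hab' | exact hac' | exact hae'
        | exact hne a b h1 | exact hne a c h2 | exact hne a e h3
        | exact hne b c h4 | exact hne b e h5 | exact hne c e h6

-- characterization of B's counter pass
lemma pv_B_iff (d : List Int) (num : Int) :
    (((d.foldl (fun dd x => dd.insert x (dd.getD x 0 + 1)) PySem.Dict.empty).values.any
        fun c => decide (num ≤ c)) = true)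
    ↔ ∃ v ∈ d, num ≤ (d.count v : Int) := by
  rw [PySem.Dict.foldl_insert_getD_add_one_eq_counter]
  have hval : (PySem.Dict.counter d).values
      = (PySem.Set.ofList d).map (fun k => (d.count k : Int)) := by
    show ((PySem.Dict.counter d).items).map Prod.snd = _
    rw [PySem.Dict.items_counter]
    simp [List.map_map, Function.comp]
  rw [hval]
  simp only [List.any_eq_true, List.mem_map, decide_eq_true_eq]
  constructor
  · rintro ⟨c, ⟨k, hk, rfl⟩, hle⟩
    exact ⟨k, (PySem.Set.mem_ofList _ _).mp hk, hle⟩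
  · rintro ⟨v, hv, hle⟩
    exact ⟨(d.count v : Int), ⟨v, (PySem.Set.mem_ofList _ _).mpr hv, rfl⟩, hle⟩

lemma pv_branch3 (d : List Int) :
    ((List.range d.length).any fun i =>
      (List.range d.length).any fun j =>
        (List.range d.length).any fun k =>
          (decide (d.getD i 0 = d.getD j 0) && decide (i ≠ j)) &&
          (decide (d.getD i 0 = d.getD k 0) && decide (i ≠ k)) &&
          decide (j ≠ k))
    = ((d.foldl (fun dd x => dd.insert x (dd.getD x 0 + 1)) PySem.Dict.empty).values.any
        fun c => decide ((3 : Int) ≤ c)) := by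
  rw [Bool.eq_iff_iff, pv_A3_iff, pv_B_iff]
  constructor <;> rintro ⟨v, hv, hc⟩ <;> exact ⟨v, hv, by exact_mod_cast hc⟩

lemma pv_branch4 (d : List Int) :
    ((List.range d.length).any fun i =>
      (List.range d.length).any fun j =>
        (List.range d.length).any fun k =>
          (List.range d.length).any fun l =>
            (decide (d.getD i 0 = d.getD j 0) && decide (i ≠ j)) &&
            (decide (d.getD i 0 = d.getD k 0) && decide (i ≠ k)) &&
            (decide (d.getD i 0 = d.getD l 0) && decide (i ≠ l)) &&
            decide (j ≠ k) && decide (j ≠ l) && decide (k ≠ l))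
    = ((d.foldl (fun dd x => dd.insert x (dd.getD x 0 + 1)) PySem.Dict.empty).values.any
        fun c => decide ((4 : Int) ≤ c)) := by
  rw [Bool.eq_iff_iff, pv_A4_iff, pv_B_iff]
  constructor <;> rintro ⟨v, hv, hc⟩ <;> exact ⟨v, hv, by exact_mod_cast hc⟩

-- ===== VERDICT (by name: the statement is the Claim_ definition above) =====
theorem check_of_a_kind_spec : Claim_equal_check_of_a_kind := by
  intro d num _
  unfold Spec_check_of_a_kind check_of_a_kind check_of_a_kind_alt
  by_cases h3 : num = 3
  · subst h3
    rw [if_pos rfl, if_pos (Or.inl rfl)]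
    exact congrArg some (pv_branch3 d)
  · by_cases h4 : num = 4
    · subst h4
      rw [if_neg (by norm_num), if_pos rfl, if_pos (Or.inr rfl)]
      exact congrArg some (pv_branch4 d)
    · rw [if_neg h3, if_neg h4, if_neg (by tauto)]
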